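-- pv_equiv track=rewrite | github.com/CYLIU2003/master-course | scripts/rebuild_built_from_normalized.py | build_pattern_lookup
-- ===== SOURCE A (Python) =====
-- def build_pattern_lookup(routes: list[dict]) -> dict[str, str]:
--     """Build mapping: odptPatternId → route_id."""
--     lookup: dict[str, str] = {}
--     for route in routes:
--         pattern_id = str(route.get("odptPatternId") or "").strip()
--         route_id = str(route.get("id") or "").strip()
--         if pattern_id and route_id and pattern_id not in lookup:
--             lookup[pattern_id] = route_id
--     return lookup
-- ===== SOURCE B (Python) =====
-- def build_pattern_lookup(routes: list[dict]) -> dict[str, str]: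
--     """Build mapping: odptPatternId -> route_id."""
--     pairs = [(str(route.get("odptPatternId") or "").strip(),
--               str(route.get("id") or "").strip()) for route in routes]
--     groups: dict[str, list[str]] = {}
--     for pattern_id, route_id in pairs:
--         if pattern_id and route_id:
--             groups[pattern_id] = groups.get(pattern_id, []) + [route_id]
--     return {pattern_id: route_ids[0] for pattern_id, route_ids in groups.items()}
-- ===== Notes on version B (the rewrite author's own statement) =====
-- stated objective: alternative
-- what changed: B is a staged group-and-project pipeline: it first maps all routes to cleaned (pattern_id, route_id) pairs, then groups the route_ids of each valid pattern_id into a multimap (insertion-ordered dict of lists), and finally projects each group to its first element, instead of A's single pass that maintains the result dict with a membership test.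
import Mathlib
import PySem

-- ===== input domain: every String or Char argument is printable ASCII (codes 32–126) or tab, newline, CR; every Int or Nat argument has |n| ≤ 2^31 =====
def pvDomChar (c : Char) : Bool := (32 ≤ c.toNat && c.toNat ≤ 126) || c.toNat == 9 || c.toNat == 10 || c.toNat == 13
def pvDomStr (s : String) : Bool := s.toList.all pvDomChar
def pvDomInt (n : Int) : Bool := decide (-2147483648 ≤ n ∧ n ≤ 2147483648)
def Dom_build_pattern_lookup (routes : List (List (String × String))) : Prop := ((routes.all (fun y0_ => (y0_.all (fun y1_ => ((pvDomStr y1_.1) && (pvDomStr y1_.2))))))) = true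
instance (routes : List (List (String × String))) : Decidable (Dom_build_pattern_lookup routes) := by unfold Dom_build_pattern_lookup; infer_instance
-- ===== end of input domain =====

-- B is a staged group-and-project pipeline (clean pairs → multimap of route_ids per key →
-- first element of each group) instead of A's single dict pass with a membership test;
-- same result, no speed claim (objective: alternative).

-- shared helper: str(route.get(key) or "").strip()  (identical expression in both Pythons)
def pvClean (route : List (String × String)) (key : String) : String :=
  PySem.Str.strip (((PySem.Dict.mk route).get? key).getD "")

-- ===== PORT A =====
def build_pattern_lookup (routes : List (List (String × String))) : List (String × String) :=
  (routes.foldl (fun (lookup : PySem.Dict String String) route =>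
      let pattern_id := pvClean route "odptPatternId"
      let route_id := pvClean route "id"
      if pattern_id ≠ "" ∧ route_id ≠ "" ∧ lookup.contains pattern_id = false then
        lookup.insert pattern_id route_id
      else lookup) PySem.Dict.empty).items

-- ===== PORT B =====
def build_pattern_lookup_alt (routes : List (List (String × String))) : List (String × String) :=
  let pairs := routes.map (fun route => (pvClean route "odptPatternId", pvClean route "id"))
  let groups := pairs.foldl (fun (g : PySem.Dict String (List String)) pr =>
      if pr.1 ≠ "" ∧ pr.2 ≠ "" then g.insert pr.1 (g.getD pr.1 [] ++ [pr.2]) else g)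
    PySem.Dict.empty
  -- {pattern_id: route_ids[0] for …}: route_ids[0] ported exactly as pyGet? (never none here)
  (PySem.Dict.ofList (groups.items.map (fun x => (x.1, (PySem.List.pyGet? x.2 0).getD "")))).items

-- ===== PRECONDITION & SPEC =====
def Spec_build_pattern_lookup (routes : List (List (String × String))) (out : List (String × String)) : Prop := out = build_pattern_lookup_alt routes
instance (routes : List (List (String × String))) (out : List (String × String)) : Decidable (Spec_build_pattern_lookup routes out) := by unfold Spec_build_pattern_lookup; infer_instance

-- ===== CLAIM (what is proved, stated in full; the proofs are below) =====
def Claim_equal_build_pattern_lookup : Prop := ∀ (routes : List (List (String × String))), Dom_build_pattern_lookup routes → Spec_build_pattern_lookup routes (build_pattern_lookup routes)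

-- ===== LEMMAS AND PROOFS =====

-- A's loop body over an already-cleaned pair
def pvStepA (d : PySem.Dict String String) (pr : String × String) : PySem.Dict String String :=
  if pr.1 ≠ "" ∧ pr.2 ≠ "" ∧ d.contains pr.1 = false then d.insert pr.1 pr.2 else d

-- B's grouping loop body
def pvStepB (g : PySem.Dict String (List String)) (pr : String × String) : PySem.Dict String (List String) :=
  if pr.1 ≠ "" ∧ pr.2 ≠ "" then g.insert pr.1 (g.getD pr.1 [] ++ [pr.2]) else g

-- B's projection: a group entry to its first route_id
def pvProj (x : String × List String) : String × String :=
  (x.1, (PySem.List.pyGet? x.2 0).getD "")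

def pvPairs (routes : List (List (String × String))) : List (String × String) :=
  routes.map (fun route => (pvClean route "odptPatternId", pvClean route "id"))

theorem pvA_eq (routes : List (List (String × String))) :
    build_pattern_lookup routes = ((pvPairs routes).foldl pvStepA PySem.Dict.empty).items := by
  unfold build_pattern_lookup pvPairs
  rw [List.foldl_map]
  rfl

theorem pvB_eq (routes : List (List (String × String))) :
    build_pattern_lookup_alt routes
      = (PySem.Dict.ofList (((pvPairs routes).foldl pvStepB PySem.Dict.empty).items.map pvProj)).items := rfl

theorem pvHead_append (rs : List String) (r : String) (h : rs ≠ []) :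
    (PySem.List.pyGet? (rs ++ [r]) 0).getD "" = (PySem.List.pyGet? rs 0).getD "" := by
  cases rs with
  | nil => exact absurd rfl h
  | cons a t =>
    have h0 : (0:Int) ≤ (t.length:Int) + 1 := by positivity
    simp [PySem.List.pyGet?, PySem.List.pyIdx?, h0]

-- the loop invariant: A's dict is the head-projection of B's multimap, whose groups are
-- nonempty and whose keys are unique
theorem pvInv (l : List (String × String)) (d : PySem.Dict String String)
    (g : PySem.Dict String (List String))
    (hit : d.items = g.items.map pvProj)
    (hne : ∀ x ∈ g.items, x.2 ≠ [])
    (hnd : g.keys.Nodup) :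
    (l.foldl pvStepA d).items = ((l.foldl pvStepB g).items).map pvProj
    ∧ (∀ x ∈ l.foldl pvStepB g |>.items, x.2 ≠ [])
    ∧ (l.foldl pvStepB g).keys.Nodup := by
  induction l generalizing d g with
  | nil => exact ⟨hit, hne, hnd⟩
  | cons pr tail ih =>
    simp only [List.foldl_cons]
    have hkeys : d.keys = g.keys := by
      simp only [PySem.Dict.keys, hit, List.map_map]
      rfl
    have hcont : ∀ k, d.contains k = g.contains k := by
      intro k
      rw [PySem.Dict.contains_eq_decide_mem_keys, PySem.Dict.contains_eq_decide_mem_keys, hkeys]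
    by_cases hv : pr.1 ≠ "" ∧ pr.2 ≠ ""
    · by_cases hc : g.contains pr.1 = false
      · -- fresh key: A appends (p, r), B appends (p, [r])
        have hA : pvStepA d pr = d.insert pr.1 pr.2 := by
          simp [pvStepA, hv.1, hv.2, hcont, hc]
        have hB : pvStepB g pr = g.insert pr.1 [pr.2] := by
          simp [pvStepB, hv.1, hv.2, PySem.Dict.getD_of_not_contains g ([] : List String) hc]
        rw [hA, hB]
        apply ih
        · rw [PySem.Dict.items_insert_of_not_contains _ _ ((hcont pr.1).trans hc),
              PySem.Dict.items_insert_of_not_contains _ _ hc, hit, List.map_append]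
          rfl
        · intro x hx
          rcases (PySem.Dict.mem_items_insert _ _ _ _).mp hx with h | h
          · simp [h]
          · exact hne x h.1
        · exact PySem.Dict.nodup_keys_insert g pr.1 [pr.2] hnd
      · -- key already grouped: A skips, B appends to the existing group (head unchanged)
        have hc' : g.contains pr.1 = true := by
          cases h : g.contains pr.1
          · exact absurd h hc
          · rfl
        have hA : pvStepA d pr = d := by
          simp [pvStepA, hcont, hc']
        have hB : pvStepB g pr = g.insert pr.1 (g.getD pr.1 [] ++ [pr.2]) := by
          simp [pvStepB, hv.1, hv.2]
        rw [hA, hB]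
        apply ih
        · rw [PySem.Dict.items_insert_of_contains _ _ hc', hit, List.map_map]
          apply List.map_congr_left
          intro q hq
          by_cases hq1 : q.1 = pr.1
          · have hget : g.getD pr.1 [] = q.2 :=
              PySem.Dict.getD_of_mem_items g (by rw [← hq1]; exact hq) hnd []
            simp only [Function.comp_apply, hq1, beq_self_eq_true, if_true, hget, pvProj]
            rw [pvHead_append _ _ (hne q hq)]
          · simp only [Function.comp_apply]
            rw [if_neg (by simpa using hq1)]
        · intro x hx
          rcases (PySem.Dict.mem_items_insert _ _ _ _).mp hx with h | h
          · simp [h]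
          · exact hne x h.1
        · exact PySem.Dict.nodup_keys_insert _ _ _ hnd
    · have hA : pvStepA d pr = d := by
        simp only [pvStepA]
        rw [if_neg]
        intro h
        exact hv ⟨h.1, h.2.1⟩
      have hB : pvStepB g pr = g := by
        simp [pvStepB, hv]
      rw [hA, hB]
      exact ih d g hit hne hnd

theorem pvOfList_items (l : List (String × String)) (h : (l.map Prod.fst).Nodup) :
    (PySem.Dict.ofList l).items = l := by
  have := PySem.Dict.items_foldl_insert_fresh l (fun it => it.1) (fun it => it.2)
    PySem.Dict.empty (fun a _ => PySem.Dict.contains_empty a.1) h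
  simpa [PySem.Dict.ofList, PySem.Dict.update] using this

-- ===== VERDICT (by name: the statement is the Claim_ definition above) =====
theorem build_pattern_lookup_spec : Claim_equal_build_pattern_lookup := by
  intro routes _
  show build_pattern_lookup routes = build_pattern_lookup_alt routes
  obtain ⟨hit, _, hnd⟩ := pvInv (pvPairs routes) PySem.Dict.empty PySem.Dict.empty
    (by simp [PySem.Dict.empty]) (by simp [PySem.Dict.empty]) (by simp [PySem.Dict.keys, PySem.Dict.empty])
  rw [pvA_eq, pvB_eq, pvOfList_items, hit]
  have : (((pvPairs routes).foldl pvStepB PySem.Dict.empty).items.map pvProj).map Prod.fst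
      = ((pvPairs routes).foldl pvStepB PySem.Dict.empty).keys := by
    simp only [List.map_map, PySem.Dict.keys]
    rfl
  rw [this]
  exact hnd
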